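-- pv_equiv track=rewrite | github.com/matan1905/TxtRepo | dsl/edit_section.py | find_change_clusters
-- ===== SOURCE A (Python) =====
-- def find_change_clusters(patches):
--     clusters = []
--     current_cluster = []
--     cluster_start = None
--     cluster_end = None
--
--     for i, (op, line) in enumerate(patches):
--         if op in ('+', '-'):
--             if not current_cluster:
--                 cluster_start = i
--             current_cluster.append((op, line))
--             cluster_end = i
--         elif current_cluster:
--             clusters.append((cluster_start, cluster_end, current_cluster))
--             current_cluster = []
--             cluster_start = None
--             cluster_end = None
--     if current_cluster:
--         clusters.append((cluster_start, cluster_end, current_cluster))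
--     return clusters
-- ===== SOURCE B (Python) =====
-- def find_change_clusters(patches):
--     clusters = []
--     i, n = 0, len(patches)
--     while i < n:
--         if patches[i][0] in ('+', '-'):
--             j = i + 1
--             while j < n and patches[j][0] in ('+', '-'):
--                 j += 1
--             clusters.append((i, j - 1, [(op, line) for op, line in patches[i:j]]))
--             i = j
--         else:
--             i += 1
--     return clusters
-- ===== Notes on version B (the rewrite author's own statement) =====
-- stated objective: alternative
-- what changed: B replaces A's stateful accumulator (current cluster list plus start/end sentinels threaded through one enumerate loop) with an index-based run scanner: an outer while finds the start of a +/- run, an inner while finds its end, and the cluster is emitted as a slice, with no cross-iteration cluster state.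
import Mathlib
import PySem

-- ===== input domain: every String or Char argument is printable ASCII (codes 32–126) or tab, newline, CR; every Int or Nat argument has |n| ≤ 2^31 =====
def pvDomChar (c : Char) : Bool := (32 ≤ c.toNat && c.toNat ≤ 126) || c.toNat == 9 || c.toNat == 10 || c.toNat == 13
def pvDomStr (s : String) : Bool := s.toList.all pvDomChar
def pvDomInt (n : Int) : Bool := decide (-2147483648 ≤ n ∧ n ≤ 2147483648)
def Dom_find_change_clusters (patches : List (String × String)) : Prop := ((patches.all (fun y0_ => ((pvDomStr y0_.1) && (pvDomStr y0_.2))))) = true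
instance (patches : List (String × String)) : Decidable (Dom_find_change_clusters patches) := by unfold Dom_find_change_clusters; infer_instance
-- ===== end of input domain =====

-- B replaces A's stateful accumulator loop with an index-based run scanner emitting each
-- +/- run as a slice; same cost, no cross-iteration cluster state (objective: alternative).

-- ===== PORT A =====
-- op in ('+', '-')
def pvIsChange (op : String) : Bool := op == "+" || op == "-"

-- A's for-loop over enumerate(patches) with state (clusters, current_cluster, cluster_start,
-- cluster_end); cluster_start/cluster_end are Option Int for Python's None (read via getD 0
-- only on branches where A has already set them to an int).
def pvLoopA : List (Int × (String × String)) → List (Int × Int × (List (String × String))) →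
    List (String × String) → Option Int → Option Int → List (Int × Int × (List (String × String)))
  | [], clusters, cur, cs, ce =>
      if cur.isEmpty then clusters else clusters ++ [(cs.getD 0, ce.getD 0, cur)]
  | (i, p) :: rest, clusters, cur, cs, ce =>
      if pvIsChange p.1 then
        pvLoopA rest clusters (cur ++ [p]) (if cur.isEmpty then some i else cs) (some i)
      else if cur.isEmpty then
        pvLoopA rest clusters cur cs ce
      else
        pvLoopA rest (clusters ++ [(cs.getD 0, ce.getD 0, cur)]) [] none none

def find_change_clusters (patches : List (String × String)) : List (Int × Int × (List (String × String))) :=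
  pvLoopA (PySem.List.enumerate patches 0) [] [] none none

-- ===== PORT B =====
-- B's outer while over positions: at a +/- line at index i the inner while extends j to the
-- run's end (takeWhile on the rest) and the cluster is the slice patches[i:j] = p :: run.
def pvBGo : Int → List (String × String) → List (Int × Int × (List (String × String)))
  | _, [] => []
  | i, p :: rest =>
      if pvIsChange p.1 then
        let grp := rest.takeWhile (fun q => pvIsChange q.1)
        (i, i + grp.length, p :: grp) ::
          pvBGo (i + 1 + grp.length) (rest.dropWhile (fun q => pvIsChange q.1))
      else
        pvBGo (i + 1) rest
  termination_by _ l => l.length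
  decreasing_by
  · exact Nat.lt_succ_of_le (List.length_dropWhile_le _ _)
  · exact Nat.lt_succ_self _

def find_change_clusters_alt (patches : List (String × String)) : List (Int × Int × (List (String × String))) :=
  pvBGo 0 patches

-- ===== PRECONDITION & SPEC =====
def Spec_find_change_clusters (patches : List (String × String)) (out : List (Int × Int × (List (String × String)))) : Prop := out = find_change_clusters_alt patches
instance (patches : List (String × String)) (out : List (Int × Int × (List (String × String)))) : Decidable (Spec_find_change_clusters patches out) := by unfold Spec_find_change_clusters; infer_instance

-- ===== CLAIM (what is proved, stated in full; the proofs are below) =====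
def Claim_equal_find_change_clusters : Prop := ∀ (patches : List (String × String)), Dom_find_change_clusters patches → Spec_find_change_clusters patches (find_change_clusters patches)

-- ===== LEMMAS AND PROOFS =====

-- Invariant of A's loop against B's scanner: from any index i, with an empty current cluster the
-- loop produces exactly B's clusters of the remaining list; with a nonempty current cluster it
-- first extends/flushes it using the leading +/- run of the remaining list.
theorem pvMain (l : List (String × String)) :
    ∀ (i : Int) (clusters : List (Int × Int × (List (String × String)))),
      (∀ cs ce, pvLoopA (PySem.List.enumerate l i) clusters [] cs ce = clusters ++ pvBGo i l) ∧
      (∀ (cur : List (String × String)) (s0 e0 : Int), cur ≠ [] →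
        pvLoopA (PySem.List.enumerate l i) clusters cur (some s0) (some e0) =
          clusters ++
            (if (l.takeWhile (fun q => pvIsChange q.1)) = [] then
              (s0, e0, cur) :: pvBGo i l
            else
              (s0, i + ((l.takeWhile (fun q => pvIsChange q.1)).length : Int) - 1,
               cur ++ l.takeWhile (fun q => pvIsChange q.1)) ::
                pvBGo (i + ((l.takeWhile (fun q => pvIsChange q.1)).length : Int))
                  (l.dropWhile (fun q => pvIsChange q.1)))) := by
  induction l with
  | nil =>
      intro i clusters
      constructor
      · intro cs ce
        simp [PySem.List.enumerate_nil, pvLoopA, pvBGo]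
      · intro cur s0 e0 hcur
        simp [PySem.List.enumerate_nil, pvLoopA, pvBGo, List.isEmpty_iff, hcur]
  | cons p rest ih =>
      intro i clusters
      have htw := List.takeWhile_append_dropWhile (p := fun q => pvIsChange q.1) (l := rest)
      constructor
      · intro cs ce
        rw [PySem.List.enumerate_cons]
        by_cases hc : pvIsChange p.1
        · simp only [pvLoopA, hc, List.isEmpty_nil, if_true, List.nil_append]
          rw [(ih (i + 1) clusters).2 [p] i i (by simp)]
          by_cases ht : rest.takeWhile (fun q => pvIsChange q.1) = []
          · have hd : rest.dropWhile (fun q => pvIsChange q.1) = rest := by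
              rw [ht] at htw; simpa using htw
            simp [pvBGo, hc, ht, hd]
          · simp only [ht, if_neg, not_false_iff, pvBGo, hc, if_true]
            simp
            omega
        · simp only [pvLoopA, hc, Bool.false_eq_true, if_false, List.isEmpty_nil, if_true]
          rw [((ih (i + 1) clusters).1) cs ce]
          simp [pvBGo, hc]
      · intro cur s0 e0 hcur
        rw [PySem.List.enumerate_cons]
        have h1 : cur.isEmpty = false := by simp [hcur]
        by_cases hc : pvIsChange p.1
        · simp only [pvLoopA, hc, if_true, h1, Bool.false_eq_true, if_false]
          rw [(ih (i + 1) clusters).2 (cur ++ [p]) s0 i (by simp)]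
          by_cases ht : rest.takeWhile (fun q => pvIsChange q.1) = []
          · have hd : rest.dropWhile (fun q => pvIsChange q.1) = rest := by
              rw [ht] at htw; simpa using htw
            simp [hc, ht, hd]
          · simp [hc, ht]
            constructor
            · omega
            · congr 1
              omega
        · simp only [pvLoopA, hc, Bool.false_eq_true, if_false, h1, Option.getD_some]
          rw [((ih (i + 1) (clusters ++ [(s0, e0, cur)])).1) none none]
          simp [hc, pvBGo]
-- ===== VERDICT (by name: the statement is the Claim_ definition above) =====
theorem find_change_clusters_spec : Claim_equal_find_change_clusters := by
  intro patches _
  unfold Spec_find_change_clusters find_change_clusters find_change_clusters_alt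
  simpa using (pvMain patches 0 []).1 none none
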